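-- pv_equiv track=rewrite | github.com/Ashish-Reddy-T/symptomSense | backend/app/services/brave_search_service.py | deduplicate_with_rag
-- ===== SOURCE A (Python) =====
-- from typing import Dict, List, Optional
--
-- def deduplicate_with_rag(
--
--     web_results: List[Dict],
--     rag_sources: List[Dict],
-- ) -> List[Dict]:
--     """
--     Remove web results that duplicate RAG sources
--
--     Useful to avoid showing the same information twice
--     """
--     # For now, simple title matching
--     # Can be enhanced with URL/content similarity
--
--     rag_titles = set()
--     for source in rag_sources:
--         source_file = source.get("source_file", "").lower()
--         # Extract document name
--         if source_file:
--             doc_name = source_file.split("/")[-1].replace(".pdf", "")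
--             rag_titles.add(doc_name)
--
--     filtered = []
--     for result in web_results:
--         title_lower = result.get("title", "").lower()
--         # Check if web result title overlaps with RAG sources
--         is_duplicate = any(rag_title in title_lower for rag_title in rag_titles)
--
--         if not is_duplicate:
--             filtered.append(result)
--
--     return filtered
-- ===== SOURCE B (Python) =====
-- def deduplicate_with_rag(web_results, rag_sources):
--     # Sieve approach: pair each result with its lowered title once, then
--     # successively filter the remaining list by each RAG doc name.
--     names = {
--         s.get("source_file", "").lower().split("/")[-1].replace(".pdf", "")
--         for s in rag_sources
--         if s.get("source_file", "").lower()
--     }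
--     remaining = [(r, r.get("title", "").lower()) for r in web_results]
--     for name in names:
--         remaining = [p for p in remaining if name not in p[1]]
--     return [p[0] for p in remaining]
-- ===== Notes on version B (the rewrite author's own statement) =====
-- stated objective: alternative
-- what changed: B lowers each title once and replaces the per-result any(name in title) scan by a sieve: it successively filters the remaining result list by one RAG doc name at a time (dual traversal order), then projects the survivors.
import Mathlib
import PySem

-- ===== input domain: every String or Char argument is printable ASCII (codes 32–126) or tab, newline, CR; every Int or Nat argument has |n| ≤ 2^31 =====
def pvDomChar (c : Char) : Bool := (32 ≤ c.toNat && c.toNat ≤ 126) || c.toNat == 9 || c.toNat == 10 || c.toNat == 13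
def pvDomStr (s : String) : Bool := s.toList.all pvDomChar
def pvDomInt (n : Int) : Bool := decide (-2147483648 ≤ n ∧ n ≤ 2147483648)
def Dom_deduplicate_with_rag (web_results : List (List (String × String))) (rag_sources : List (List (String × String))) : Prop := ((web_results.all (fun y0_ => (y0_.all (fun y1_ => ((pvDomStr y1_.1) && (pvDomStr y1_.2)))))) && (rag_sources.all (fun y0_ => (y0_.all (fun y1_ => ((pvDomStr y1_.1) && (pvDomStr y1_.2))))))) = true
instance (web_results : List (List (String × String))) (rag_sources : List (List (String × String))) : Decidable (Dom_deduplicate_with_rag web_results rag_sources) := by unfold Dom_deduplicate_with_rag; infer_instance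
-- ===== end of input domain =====

-- B replaces A's per-result `any(name in title)` scan by a sieve that pairs each
-- result with its lowered title once and successively filters by each RAG name
-- (objective: alternative traversal, same asymptotic cost).

-- source_file.split("/")[-1].replace(".pdf", "")  (split? is some since "/" ≠ "",
-- pyGet? is some since a split result is nonempty — the getD defaults are never used)
def pvDocName (source_file : String) : String :=
  PySem.Str.replace
    ((PySem.List.pyGet? ((PySem.Str.split? source_file "/").getD []) (-1)).getD "")
    ".pdf" ""

-- ===== PORT A =====
def deduplicate_with_rag (web_results : List (List (String × String))) (rag_sources : List (List (String × String))) : List (List (String × String)) :=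
  let rag_titles : PySem.Set String :=
    rag_sources.foldl (fun acc source =>
      let source_file := PySem.Str.lower (PySem.Dict.getD (PySem.Dict.mk source) "source_file" "")
      if source_file != "" then
        PySem.Set.add acc (pvDocName source_file)
      else acc) PySem.Set.empty
  web_results.foldl (fun filtered result =>
      let title_lower := PySem.Str.lower (PySem.Dict.getD (PySem.Dict.mk result) "title" "")
      let is_duplicate := rag_titles.any (fun t => PySem.Str.isIn t title_lower)
      if !is_duplicate then filtered ++ [result] else filtered) []

-- ===== PORT B =====
def deduplicate_with_rag_alt (web_results : List (List (String × String))) (rag_sources : List (List (String × String))) : List (List (String × String)) :=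
  let names : PySem.Set String :=
    PySem.Set.ofList
      (((rag_sources.filter (fun s =>
          PySem.Str.lower (PySem.Dict.getD (PySem.Dict.mk s) "source_file" "") != "")).map
        (fun s => pvDocName (PySem.Str.lower (PySem.Dict.getD (PySem.Dict.mk s) "source_file" "")))))
  let remaining := web_results.map (fun r => (r, PySem.Str.lower (PySem.Dict.getD (PySem.Dict.mk r) "title" "")))
  let remaining := names.foldl (fun rem name => rem.filter (fun p => !(PySem.Str.isIn name p.2))) remaining
  remaining.map (fun p => p.1)

-- ===== PRECONDITION & SPEC =====
def Spec_deduplicate_with_rag (web_results : List (List (String × String))) (rag_sources : List (List (String × String))) (out : List (List (String × String))) : Prop := out = deduplicate_with_rag_alt web_results rag_sources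
instance (web_results : List (List (String × String))) (rag_sources : List (List (String × String))) (out : List (List (String × String))) : Decidable (Spec_deduplicate_with_rag web_results rag_sources out) := by unfold Spec_deduplicate_with_rag; infer_instance

-- ===== CLAIM (what is proved, stated in full; the proofs are below) =====
def Claim_equal_deduplicate_with_rag : Prop := ∀ (web_results : List (List (String × String))) (rag_sources : List (List (String × String))), Dom_deduplicate_with_rag web_results rag_sources → Spec_deduplicate_with_rag web_results rag_sources (deduplicate_with_rag web_results rag_sources)

-- ===== LEMMAS AND PROOFS =====

-- both versions collect the same name list
lemma names_eq (rag_sources : List (List (String × String))) :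
    rag_sources.foldl (fun acc source =>
      let source_file := PySem.Str.lower (PySem.Dict.getD (PySem.Dict.mk source) "source_file" "")
      if source_file != "" then PySem.Set.add acc (pvDocName source_file) else acc)
      PySem.Set.empty
    = PySem.Set.ofList
      (((rag_sources.filter (fun s =>
          PySem.Str.lower (PySem.Dict.getD (PySem.Dict.mk s) "source_file" "") != "")).map
        (fun s => pvDocName (PySem.Str.lower (PySem.Dict.getD (PySem.Dict.mk s) "source_file" ""))))) := by
  rw [PySem.Set.ofList_eq_foldl, List.foldl_map, List.foldl_filter]; rfl

-- the sieve of filters is one filter by "no name occurs"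
lemma sieve_eq (ns : List String) (L : List ((List (String × String)) × String)) :
    ns.foldl (fun rem name => rem.filter (fun p => !(PySem.Str.isIn name p.2))) L
    = L.filter (fun p => !(ns.any (fun n => PySem.Str.isIn n p.2))) := by
  induction ns generalizing L with
  | nil => simp
  | cons n ns ih =>
      simp only [List.foldl_cons, ih, List.filter_filter, List.any_cons, Bool.not_or,
        Bool.and_comm]

-- ===== VERDICT (by name: the statement is the Claim_ definition above) =====
theorem deduplicate_with_rag_spec : Claim_equal_deduplicate_with_rag := by
  intro web rag _
  unfold Spec_deduplicate_with_rag deduplicate_with_rag deduplicate_with_rag_alt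
  rw [← names_eq]
  simp only [sieve_eq, PySem.List.foldl_append_if (f := fun x => x), List.filter_map,
    List.nil_append, List.map_map]
  simp [Function.comp_def]
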